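-- pv_equiv track=rewrite | github.com/JoshuaDunnink/Advent_of_Code | source/2023/day_10.py | count_included_cels
-- ===== SOURCE A (Python) =====
-- def count_included_cels(i, line: list, marked_path):
--     opened = ""
--     count_line = []
--     for index, char in enumerate(marked_path):
--         waypoint = line[index]
--         if char == "X":
--             if waypoint == "|":
--                 count_line += "|"
--             elif waypoint in "FL":
--                 opened = waypoint
--             elif opened + waypoint in ["FJ", "L7"]:
--                 count_line += "|"
--         else:
--             count_line += "."
--
--     surrounded = 0
--     counted_passes = 0
--     for index, char in enumerate(count_line):
--         if char == "|":
--             counted_passes += 1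
--         elif counted_passes % 2 == 1:
--             surrounded += 1
--
--     return surrounded
-- ===== SOURCE B (Python) =====
-- def count_included_cels(i, line: list, marked_path):
--     # Different algorithm: collect the index positions of pipe crossings and of
--     # non-path cells, then count via a two-pointer merge of the two index lists
--     # (a cell counts iff an odd number of crossings precede it).
--     opened = ""
--     crossings = []
--     dots = []
--     for index, (char, waypoint) in enumerate(zip(marked_path, line)):
--         if char == "X":
--             if waypoint == "|":
--                 crossings.append(index)
--             elif waypoint in "FL":
--                 opened = waypoint
--             elif opened + waypoint in ["FJ", "L7"]:
--                 crossings.append(index)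
--         else:
--             dots.append(index)
--
--     surrounded = 0
--     k = 0
--     for d in dots:
--         while k < len(crossings) and crossings[k] < d:
--             k += 1
--         if k % 2 == 1:
--             surrounded += 1
--     return surrounded
-- ===== Notes on version B (the rewrite author's own statement) =====
-- stated objective: alternative
-- what changed: B never builds A's symbol list: it collects the index positions of crossings and of non-path cells and counts by a two-pointer merge of the two index lists, testing the parity of the crossing pointer at each non-path index.
import Mathlib
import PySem

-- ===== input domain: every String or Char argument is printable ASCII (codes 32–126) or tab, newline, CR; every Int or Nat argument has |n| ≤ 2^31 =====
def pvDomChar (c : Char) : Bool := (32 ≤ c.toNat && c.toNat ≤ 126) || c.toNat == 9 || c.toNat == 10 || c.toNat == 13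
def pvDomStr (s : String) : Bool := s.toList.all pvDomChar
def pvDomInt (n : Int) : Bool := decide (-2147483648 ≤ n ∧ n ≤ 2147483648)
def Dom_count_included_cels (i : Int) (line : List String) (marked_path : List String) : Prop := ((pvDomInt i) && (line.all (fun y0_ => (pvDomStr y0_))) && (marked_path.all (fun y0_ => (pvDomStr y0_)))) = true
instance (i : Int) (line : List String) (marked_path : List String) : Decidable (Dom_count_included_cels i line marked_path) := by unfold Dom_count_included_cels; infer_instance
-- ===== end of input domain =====

-- B replaces A's symbol-list + parity scan by an index-list two-pointer merge (objective: alternative).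

-- ===== PORT A =====
-- first loop body: state = (opened, count_line); string comparisons are done on .toList
-- (exact: Python's `waypoint in "FL"` substring test is PySem.Chars.isIn)
def stepA1 (line : List String) (st : String × List Char) (p : Int × String) : String × List Char :=
  let waypoint := (PySem.List.pyGet? line p.1).getD ""   -- line[p.1]; none (IndexError) excluded by Pre_
  if p.2.toList = ['X'] then
    if waypoint.toList = ['|'] then (st.1, st.2 ++ ['|'])
    else if PySem.Chars.isIn waypoint.toList ['F', 'L'] then (waypoint, st.2)
    else if st.1.toList ++ waypoint.toList = ['F', 'J'] ∨ st.1.toList ++ waypoint.toList = ['L', '7'] then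
      (st.1, st.2 ++ ['|'])
    else st
  else (st.1, st.2 ++ ['.'])

-- second loop body: state = (surrounded, counted_passes)
def stepA2 (sc : Int × Int) (q : Int × Char) : Int × Int :=
  if q.2 = '|' then (sc.1, sc.2 + 1)
  else if PySem.Int.mod sc.2 2 = 1 then (sc.1 + 1, sc.2)
  else sc

def count_included_cels (i : Int) (line : List String) (marked_path : List String) : Int :=
  let r1 := (PySem.List.enumerate marked_path 0).foldl (stepA1 line) ("", [])
  ((PySem.List.enumerate r1.2 0).foldl stepA2 (0, 0)).1

-- ===== PORT B =====
-- first pass over enumerate(zip(marked_path, line)): state = (opened, crossings, dots), two INDEX lists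
def stepB (st : String × List Int × List Int) (p : Int × String × String) : String × List Int × List Int :=
  if p.2.1.toList = ['X'] then
    if p.2.2.toList = ['|'] then (st.1, st.2.1 ++ [p.1], st.2.2)
    else if PySem.Chars.isIn p.2.2.toList ['F', 'L'] then (p.2.2, st.2.1, st.2.2)
    else if st.1.toList ++ p.2.2.toList = ['F', 'J'] ∨ st.1.toList ++ p.2.2.toList = ['L', '7'] then
      (st.1, st.2.1 ++ [p.1], st.2.2)
    else st
  else (st.1, st.2.1, st.2.2 ++ [p.1])

-- the inner `while k < len(crossings) and crossings[k] < d: k += 1`: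
-- pointer k is represented as (remaining suffix of crossings, k)
def advanceB : List Int → Int → Int → List Int × Int
  | [], k, _ => ([], k)
  | c :: cs, k, d => if c < d then advanceB cs (k + 1) d else (c :: cs, k)

-- the `for d in dots` loop
def loopB : List Int → Int → Int → List Int → Int
  | _, _, acc, [] => acc
  | cs, k, acc, d :: ds =>
      let r := advanceB cs k d
      loopB r.1 r.2 (if PySem.Int.mod r.2 2 = 1 then acc + 1 else acc) ds

def count_included_cels_alt (i : Int) (line : List String) (marked_path : List String) : Int :=
  let r := (PySem.List.enumerate (marked_path.zip line) 0).foldl stepB ("", [], [])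
  loopB r.2.1 0 0 r.2.2

-- ===== PRECONDITION & SPEC =====
-- A reads line[index] for every index of marked_path: it raises IndexError iff line is shorter.
def Pre_count_included_cels (i : Int) (line : List String) (marked_path : List String) : Prop :=
  marked_path.length ≤ line.length
instance (i : Int) (line : List String) (marked_path : List String) : Decidable (Pre_count_included_cels i line marked_path) := by unfold Pre_count_included_cels; infer_instance

def pvWitness_count_included_cels : Int × List String × List String := (0, ["|", "."], ["X", "."])

def Spec_count_included_cels (i : Int) (line : List String) (marked_path : List String) (out : Int) : Prop := out = count_included_cels_alt i line marked_path
instance (i : Int) (line : List String) (marked_path : List String) (out : Int) : Decidable (Spec_count_included_cels i line marked_path out) := by unfold Spec_count_included_cels; infer_instance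

-- ===== CLAIM (what is proved, stated in full; the proofs are below) =====
def Claim_equal_count_included_cels : Prop := ∀ (i : Int) (line : List String) (marked_path : List String), Dom_count_included_cels i line marked_path → Pre_count_included_cels i line marked_path → Spec_count_included_cels i line marked_path (count_included_cels i line marked_path)

-- ===== LEMMAS AND PROOFS =====

-- emitted cells of the first pass, with their enumerate index (true = crossing '|', false = '.')
def etags (s : Int) (opened : String) : List (String × String) → List (Int × Bool)
  | [] => []
  | (c, w) :: r =>
    if c.toList = ['X'] then
      if w.toList = ['|'] then (s, true) :: etags (s + 1) opened r
      else if PySem.Chars.isIn w.toList ['F', 'L'] then etags (s + 1) w r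
      else if opened.toList ++ w.toList = ['F', 'J'] ∨ opened.toList ++ w.toList = ['L', '7'] then
        (s, true) :: etags (s + 1) opened r
      else etags (s + 1) opened r
    else (s, false) :: etags (s + 1) opened r

-- final value of `opened` after the first pass
def finO (opened : String) : List (String × String) → String
  | [] => opened
  | (c, w) :: r =>
    if c.toList = ['X'] ∧ ¬ w.toList = ['|'] ∧ PySem.Chars.isIn w.toList ['F', 'L'] = true then finO w r
    else finO opened r

def render (b : Bool) : Char := if b then '|' else '.'

-- second-pass body of A with the (unused) enumerate index stripped
def g2 (sc : Int × Int) (ch : Char) : Int × Int :=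
  if ch = '|' then (sc.1, sc.2 + 1)
  else if PySem.Int.mod sc.2 2 = 1 then (sc.1 + 1, sc.2)
  else sc

-- reference count: cells with an odd number of crossings before them
def specCount : List Bool → Bool → Int
  | [], _ => 0
  | true :: r, p => specCount r (!p)
  | false :: r, p => (if p then 1 else 0) + specCount r p

theorem fold_stepA2_eq_g2 : ∀ (l : List Char) (s : Int) (sc : Int × Int),
    (PySem.List.enumerate l s).foldl stepA2 sc = l.foldl g2 sc := by
  intro l
  induction l with
  | nil => intro s sc; rfl
  | cons c cs ih =>
      intro s sc
      simp [PySem.List.enumerate_cons, List.foldl, ih, stepA2, g2]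

theorem mod_two_flip (cp : Int) :
    decide (PySem.Int.mod (cp + 1) 2 = 1) = !decide (PySem.Int.mod cp 2 = 1) := by
  have h1 : PySem.Int.mod (cp + 1) 2 = (cp + 1) % 2 := PySem.Int.mod_eq_emod_of_pos (by omega)
  have h2 : PySem.Int.mod cp 2 = cp % 2 := PySem.Int.mod_eq_emod_of_pos (by omega)
  rw [h1, h2]
  by_cases h : cp % 2 = 1 <;> simp [h] <;> omega

theorem emod_two_flip (cp : Int) :
    decide ((cp + 1) % 2 = 1) = !decide (cp % 2 = 1) := by
  by_cases h : cp % 2 = 1 <;> simp [h] <;> omega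

theorem g2_spec : ∀ (tags : List Bool) (su cp : Int),
    ((tags.map render).foldl g2 (su, cp)).1
      = su + specCount tags (decide (PySem.Int.mod cp 2 = 1)) := by
  intro tags
  induction tags with
  | nil => intro su cp; simp [specCount]
  | cons b r ih =>
      intro su cp
      have hm : PySem.Int.mod cp 2 = cp % 2 := PySem.Int.mod_eq_emod_of_pos (by omega)
      cases b with
      | true =>
          simp [render, g2, specCount, ih, emod_two_flip]
      | false =>
          rw [hm]
          by_cases h : cp % 2 = 1
          · simp [render, g2, specCount, h, ih]; ring
          · simp [render, g2, specCount, h, ih]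

-- first pass of A equals etags (rendered), with the line split as pre ++ rest
theorem foldA_etags : ∀ (ms : List String) (pre rest : List String) (opened : String) (cl : List Char),
    ms.length ≤ rest.length →
    (PySem.List.enumerate ms (pre.length : Int)).foldl (stepA1 (pre ++ rest)) (opened, cl)
      = (finO opened (ms.zip rest),
         cl ++ (etags (pre.length : Int) opened (ms.zip rest)).map (fun p => render p.2)) := by
  intro ms
  induction ms with
  | nil => intro pre rest opened cl _; simp [etags, finO]
  | cons m ms ih =>
      intro pre rest opened cl hlen
      cases rest with
      | nil => simp at hlen
      | cons r rest' =>
          rw [PySem.List.enumerate_cons]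
          simp only [List.foldl_cons, List.zip_cons_cons]
          have hget : PySem.List.pyGet? (pre ++ r :: rest') (pre.length : Int) = some r := by
            rw [PySem.List.pyGet?_natCast]
            rw [List.getElem?_append_right (Nat.le_refl _)]
            simp
          have hw : ((PySem.List.pyGet? (pre ++ r :: rest') (pre.length : Int)).getD "") = r := by
            rw [hget]; rfl
          have hcast : ((pre.length : Int) + 1) = ((pre ++ [r]).length : Int) := by
            simp only [List.length_append, List.length_cons, List.length_nil]
            push_cast
            ring
          have happ : pre ++ r :: rest' = (pre ++ [r]) ++ rest' := by simp
          have hlen' : ms.length ≤ rest'.length := by simpa using hlen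
          by_cases h1 : m.toList = ['X']
          · by_cases h2 : r.toList = ['|']
            · have eA : stepA1 (pre ++ r :: rest') (opened, cl) ((pre.length : Int), m)
                  = (opened, cl ++ ['|']) := by
                simp [stepA1, hw, h1, h2]
              rw [eA, hcast, happ, ih (pre ++ [r]) rest' opened (cl ++ ['|']) hlen']
              rw [← hcast]
              simp [etags, finO, h1, h2, render]
            · by_cases h3 : PySem.Chars.isIn r.toList ['F', 'L'] = true
              · have eA : stepA1 (pre ++ r :: rest') (opened, cl) ((pre.length : Int), m)
                    = (r, cl) := by
                  simp [stepA1, hw, h1, h2, h3]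
                rw [eA, hcast, happ, ih (pre ++ [r]) rest' r cl hlen']
                rw [← hcast]
                simp [etags, finO, h1, h2, h3]
              · by_cases h4 : opened.toList ++ r.toList = ['F', 'J'] ∨
                    opened.toList ++ r.toList = ['L', '7']
                · have eA : stepA1 (pre ++ r :: rest') (opened, cl) ((pre.length : Int), m)
                      = (opened, cl ++ ['|']) := by
                    simp [stepA1, hw, h1, h2, h3, h4]
                  rw [eA, hcast, happ, ih (pre ++ [r]) rest' opened (cl ++ ['|']) hlen']
                  rw [← hcast]
                  simp [etags, finO, h1, h2, h3, h4, render]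
                · have eA : stepA1 (pre ++ r :: rest') (opened, cl) ((pre.length : Int), m)
                      = (opened, cl) := by
                    simp [stepA1, hw, h1, h2, h3, h4]
                  rw [eA, hcast, happ, ih (pre ++ [r]) rest' opened cl hlen']
                  rw [← hcast]
                  simp [etags, finO, h1, h2, h3, h4]
          · have eA : stepA1 (pre ++ r :: rest') (opened, cl) ((pre.length : Int), m)
                = (opened, cl ++ ['.']) := by
              simp [stepA1, h1]
            rw [eA, hcast, happ, ih (pre ++ [r]) rest' opened (cl ++ ['.']) hlen']
            rw [← hcast]
            simp [etags, finO, h1, render]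

-- first pass of B collects exactly the crossing / dot indices of etags
theorem foldB_etags : ∀ (zs : List (String × String)) (s : Int) (opened : String)
    (cs ds : List Int),
    (PySem.List.enumerate zs s).foldl stepB (opened, cs, ds)
      = (finO opened zs,
         cs ++ ((etags s opened zs).filter (·.2)).map (·.1),
         ds ++ ((etags s opened zs).filter (fun p => !p.2)).map (·.1)) := by
  intro zs
  induction zs with
  | nil => intro s opened cs ds; simp [etags, finO]
  | cons z zs ih =>
      intro s opened cs ds
      obtain ⟨c, w⟩ := z
      rw [PySem.List.enumerate_cons]
      simp only [List.foldl_cons]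
      by_cases h1 : c.toList = ['X']
      · by_cases h2 : w.toList = ['|']
        · have eB : stepB (opened, cs, ds) (s, c, w) = (opened, cs ++ [s], ds) := by
            simp [stepB, h1, h2]
          rw [eB, ih]
          simp [etags, finO, h1, h2]
        · by_cases h3 : PySem.Chars.isIn w.toList ['F', 'L'] = true
          · have eB : stepB (opened, cs, ds) (s, c, w) = (w, cs, ds) := by
              simp [stepB, h1, h2, h3]
            rw [eB, ih]
            simp [etags, finO, h1, h2, h3]
          · by_cases h4 : opened.toList ++ w.toList = ['F', 'J'] ∨
                opened.toList ++ w.toList = ['L', '7']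
            · have eB : stepB (opened, cs, ds) (s, c, w) = (opened, cs ++ [s], ds) := by
                simp [stepB, h1, h2, h3, h4]
              rw [eB, ih]
              simp [etags, finO, h1, h2, h3, h4]
            · have eB : stepB (opened, cs, ds) (s, c, w) = (opened, cs, ds) := by
                simp [stepB, h1, h2, h3, h4]
              rw [eB, ih]
              simp [etags, finO, h1, h2, h3, h4]
      · have eB : stepB (opened, cs, ds) (s, c, w) = (opened, cs, ds ++ [s]) := by
          simp [stepB, h1]
        rw [eB, ih]
        simp [etags, finO, h1]

theorem etags_lb : ∀ (zs : List (String × String)) (s : Int) (opened : String)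
    (p : Int × Bool), p ∈ etags s opened zs → s ≤ p.1 := by
  intro zs
  induction zs with
  | nil => intro s opened p hp; simp [etags] at hp
  | cons z zs ih =>
      intro s opened p hp
      obtain ⟨c, w⟩ := z
      unfold etags at hp
      split_ifs at hp with h1 h2 h3 h4 <;>
        first
          | (rcases List.mem_cons.mp hp with h | h
             · subst h; exact le_refl _
             · have := ih (s + 1) _ p h; omega)
          | (have := ih (s + 1) _ p hp; omega)

theorem etags_pairwise : ∀ (zs : List (String × String)) (s : Int) (opened : String),
    (etags s opened zs).Pairwise (fun p q => p.1 < q.1) := by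
  intro zs
  induction zs with
  | nil => intro s opened; simp [etags]
  | cons z zs ih =>
      intro s opened
      obtain ⟨c, w⟩ := z
      unfold etags
      split_ifs with h1 h2 h3 h4 <;>
        first
          | (refine List.pairwise_cons.mpr ⟨?_, ih (s + 1) _⟩
             intro q hq
             have := etags_lb zs (s + 1) _ q hq
             simp; omega)
          | exact ih (s + 1) _

-- skipping a crossing smaller than every remaining dot just advances the pointer
theorem loopB_skip (c : Int) (cs : List Int) (k acc : Int) (ds : List Int)
    (h : ∀ d ∈ ds, c < d) : loopB (c :: cs) k acc ds = loopB cs (k + 1) acc ds := by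
  cases ds with
  | nil => rfl
  | cons d ds' =>
      have hc : c < d := h d (List.mem_cons_self)
      simp only [loopB, advanceB, if_pos hc]

theorem advanceB_stop (cs : List Int) (k d : Int) (h : ∀ c ∈ cs, d ≤ c) :
    advanceB cs k d = (cs, k) := by
  cases cs with
  | nil => rfl
  | cons c cs' =>
      have : ¬ c < d := not_lt.mpr (h c (List.mem_cons_self))
      simp [advanceB, this]

theorem twoPtr : ∀ (ets : List (Int × Bool)),
    ets.Pairwise (fun p q => p.1 < q.1) → ∀ (k acc : Int),
    loopB ((ets.filter (·.2)).map (·.1)) k acc ((ets.filter (fun p => !p.2)).map (·.1))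
      = acc + specCount (ets.map Prod.snd) (decide (PySem.Int.mod k 2 = 1)) := by
  intro ets
  induction ets with
  | nil => intro _ k acc; simp [loopB, specCount]
  | cons e rest ih =>
      intro hpw k acc
      obtain ⟨hlt, hpw'⟩ := List.pairwise_cons.mp hpw
      obtain ⟨idx, b⟩ := e
      cases b with
      | true =>
          simp only [List.filter_cons, List.map_cons, List.map, decide_true, Bool.not_true,
            Bool.false_eq_true, if_true, if_false]
          have hall : ∀ d ∈ (rest.filter (fun p => !p.2)).map (·.1), idx < d := by
            intro d hd
            simp only [List.mem_map, List.mem_filter] at hd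
            obtain ⟨q, ⟨hq, _⟩, rfl⟩ := hd
            exact hlt q hq
          rw [loopB_skip idx _ k acc _ hall, ih hpw' (k + 1) acc, mod_two_flip]
          rfl
      | false =>
          simp only [List.filter_cons, List.map_cons, List.map, decide_false, Bool.not_false,
            Bool.false_eq_true, if_false, if_true]
          have hall : ∀ c ∈ (rest.filter (·.2)).map (·.1), idx ≤ c := by
            intro c hc
            simp only [List.mem_map, List.mem_filter] at hc
            obtain ⟨q, ⟨hq, _⟩, rfl⟩ := hc
            exact le_of_lt (hlt q hq)
          show loopB _ k acc (idx :: _) = _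
          rw [loopB]
          rw [advanceB_stop _ k idx hall]
          rw [ih hpw' k _]
          simp only [List.map_cons, specCount]
          by_cases h : k % 2 = 1 <;> simp [h] <;> ring

-- ===== VERDICT (by name: the statement is the Claim_ definition above) =====
theorem count_included_cels_spec : Claim_equal_count_included_cels := by
  intro i line marked_path _ hpre
  unfold Spec_count_included_cels count_included_cels count_included_cels_alt
  dsimp only
  have hA := foldA_etags marked_path [] line "" [] hpre
  simp only [List.nil_append, List.length_nil, Nat.cast_zero] at hA
  have hB := foldB_etags (marked_path.zip line) 0 "" [] []
  simp only [List.nil_append] at hB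
  rw [hA, hB]
  dsimp only
  rw [fold_stepA2_eq_g2]
  have hmm : (etags 0 "" (marked_path.zip line)).map (fun p => render p.2)
      = ((etags 0 "" (marked_path.zip line)).map Prod.snd).map render := by
    simp [List.map_map]
  rw [hmm, g2_spec, twoPtr _ (etags_pairwise _ 0 "")]
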